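-- pv_equiv track=rewrite | github.com/ShaneDonavanJr/Game_Math | SlaytheSpire/poisonDamage.py | calculate_poison_damage
-- ===== SOURCE A (Python) =====
-- def calculate_poison_damage(initial_poison, rounds):
--     """
--     Calculate the total poison damage dealt over a given number of rounds in Slay the Spire.
--
--     :param initial_poison: The initial amount of poison on the target.
--     :param rounds: The number of rounds to calculate damage for.
--     :return: A list of tuples showing the damage per round and total damage.
--     """
--     poison = initial_poison
--     total_damage = 0
--     damage_by_round = []
--
--     for round_num in range(1, rounds + 1):
--         if poison <= 0:
--             break
--         # Poison damage is dealt
--         total_damage += poison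
--         damage_by_round.append((round_num, poison, total_damage))
--         # Poison count decreases by 1
--         poison -= 1
--
--     return damage_by_round
-- ===== SOURCE B (Python) =====
-- def calculate_poison_damage(initial_poison, rounds):
--     # Closed form: round r deals initial_poison - r + 1 damage, and the running
--     # total after round r is r*initial_poison - r*(r-1)//2 (triangular-number sum).
--     n = min(rounds, initial_poison)
--     if n < 0:
--         n = 0
--     return [(r, initial_poison - r + 1, r * initial_poison - r * (r - 1) // 2)
--             for r in range(1, n + 1)]
-- ===== Notes on version B (the rewrite author's own statement) =====
-- stated objective: alternative
-- what changed: Replaces the fused accumulator loop (running poison/total state with a break) by a closed form: the number of dealt rounds is max(0, min(rounds, initial_poison)) and each tuple is computed directly from the round number via the triangular-number prefix sum r*p - r*(r-1)//2, so B keeps no loop state at all.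
import Mathlib
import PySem

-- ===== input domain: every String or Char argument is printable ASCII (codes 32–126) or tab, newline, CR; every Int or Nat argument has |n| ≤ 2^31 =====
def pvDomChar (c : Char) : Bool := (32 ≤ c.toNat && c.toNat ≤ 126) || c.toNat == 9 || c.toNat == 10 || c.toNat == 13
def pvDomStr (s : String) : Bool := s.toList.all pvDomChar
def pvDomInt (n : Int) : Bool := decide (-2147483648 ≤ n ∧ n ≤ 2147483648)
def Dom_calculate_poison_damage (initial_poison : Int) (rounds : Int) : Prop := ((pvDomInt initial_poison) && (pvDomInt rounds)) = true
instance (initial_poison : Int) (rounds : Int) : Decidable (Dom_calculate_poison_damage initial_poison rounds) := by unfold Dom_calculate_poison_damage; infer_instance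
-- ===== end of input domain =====

-- B replaces the stateful break-loop by a closed-form comprehension (round count and
-- triangular-number prefix sums computed directly); equivalence of return values is proved.

-- ===== PORT A =====
-- the for/break loop of A, step for step: 'for round_num in range(1, rounds+1)' is the
-- counter round_num with (rounds+1-1).toNat remaining iterations (range is lazy in Python);
-- state = (poison, total_damage, damage_by_round)
def pvA_loop : ℕ → Int → Int → Int → List (Int × Int × Int) → List (Int × Int × Int)
  | 0, _, _, _, acc => acc
  | n + 1, round_num, poison, total, acc =>
    if poison ≤ 0 then acc
    else pvA_loop n (round_num + 1) (poison - 1) (total + poison)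
           (acc ++ [(round_num, poison, total + poison)])

def calculate_poison_damage (initial_poison : Int) (rounds : Int) : List (Int × Int × Int) :=
  pvA_loop (rounds + 1 - 1).toNat 1 initial_poison 0 []

-- ===== PORT B =====
def calculate_poison_damage_alt (initial_poison : Int) (rounds : Int) : List (Int × Int × Int) :=
  let n0 := min rounds initial_poison
  let n := if n0 < 0 then 0 else n0
  (PySem.List.pyRange 1 (n + 1) 1).map
    (fun r => (r, initial_poison - r + 1,
               r * initial_poison - PySem.Int.floordiv (r * (r - 1)) 2))

-- ===== PRECONDITION & SPEC =====
def Spec_calculate_poison_damage (initial_poison : Int) (rounds : Int) (out : List (Int × Int × Int)) : Prop := out = calculate_poison_damage_alt initial_poison rounds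
instance (initial_poison : Int) (rounds : Int) (out : List (Int × Int × Int)) : Decidable (Spec_calculate_poison_damage initial_poison rounds out) := by unfold Spec_calculate_poison_damage; infer_instance

-- ===== CLAIM (what is proved, stated in full; the proofs are below) =====
def Claim_equal_calculate_poison_damage : Prop := ∀ (initial_poison : Int) (rounds : Int), Dom_calculate_poison_damage initial_poison rounds → Spec_calculate_poison_damage initial_poison rounds (calculate_poison_damage initial_poison rounds)

-- ===== LEMMAS AND PROOFS =====

-- triangular-sum step: r(r-1)//2 = (r-1)(r-2)//2 + (r-1)
lemma pv_fd_step (r : Int) :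
    PySem.Int.floordiv (r * (r - 1)) 2 = PySem.Int.floordiv ((r - 1) * (r - 2)) 2 + (r - 1) := by
  rw [PySem.Int.floordiv_eq_ediv_of_pos (by norm_num),
      PySem.Int.floordiv_eq_ediv_of_pos (by norm_num)]
  have h : r * (r - 1) = (r - 1) * (r - 2) + (r - 1) * 2 := by ring
  rw [h, Int.add_mul_ediv_right _ _ (by norm_num)]

-- invariant of A's loop: with p rounds of poison left and total t matching the closed
-- form at round r0, the loop appends exactly the closed-form tuples
lemma pv_loop_eq (ip : Int) : ∀ (m : ℕ) (r0 p t : Int) (acc : List (Int × Int × Int)),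
    p = ip - r0 + 1 →
    t = (r0 - 1) * ip - PySem.Int.floordiv ((r0 - 1) * (r0 - 2)) 2 →
    pvA_loop m r0 p t acc
    = acc ++ (PySem.List.pyRange r0 (r0 + min (m : Int) (max p 0)) 1).map
        (fun r => (r, ip - r + 1, r * ip - PySem.Int.floordiv (r * (r - 1)) 2)) := by
  intro m
  induction m with
  | zero =>
    intro r0 p t acc hp ht
    rw [PySem.List.pyRange_one_eq_nil (a := r0) (by omega)]
    simp [pvA_loop]
  | succ m ih =>
    intro r0 p t acc hp ht
    by_cases hple : p ≤ 0
    · rw [PySem.List.pyRange_one_eq_nil (a := r0) (by omega)]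
      simp [pvA_loop, hple]
    · have hpos : 0 < p := by omega
      push_cast
      simp only [pvA_loop, if_neg hple]
      have ht' : t + p = (r0 + 1 - 1) * ip
          - PySem.Int.floordiv ((r0 + 1 - 1) * (r0 + 1 - 2)) 2 := by
        rw [show r0 + 1 - 1 = r0 by ring, show r0 + 1 - 2 = r0 - 1 by ring]
        have hm1 : (r0 - 1) * ip + ip = r0 * ip := by ring
        have := pv_fd_step r0
        omega
      rw [ih (r0 + 1) (p - 1) (t + p) (acc ++ [(r0, p, t + p)]) (by omega) ht']
      have hcap : (r0 + 1) + min ((m : ℕ) : ℤ) (max (p - 1) 0)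
          = r0 + min (((m : ℕ) : ℤ) + 1) (max p 0) := by omega
      rw [hcap, PySem.List.pyRange_one_cons (a := r0) (by omega)]
      simp only [List.map_cons, List.append_assoc, List.singleton_append]
      have hfst : ip - r0 + 1 = p := by omega
      have hsnd : r0 * ip - PySem.Int.floordiv (r0 * (r0 - 1)) 2 = t + p := by
        have hm1 : (r0 - 1) * ip + ip = r0 * ip := by ring
        have := pv_fd_step r0
        omega
      rw [hfst, hsnd]

-- ===== VERDICT (by name: the statement is the Claim_ definition above) =====
theorem calculate_poison_damage_spec : Claim_equal_calculate_poison_damage := by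
  intro ip rounds _
  unfold Spec_calculate_poison_damage calculate_poison_damage calculate_poison_damage_alt
  rw [pv_loop_eq ip (rounds + 1 - 1).toNat 1 ip 0 [] (by ring)
        (by norm_num [PySem.Int.floordiv]),
      show (1 : Int) + min (((rounds + 1 - 1).toNat : ℕ) : ℤ) (max ip 0)
          = (if min rounds ip < 0 then 0 else min rounds ip) + 1 by split_ifs <;> omega]
  simp
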